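-- pv_equiv track=rewrite | github.com/0h328/TIL | 0810/airtrack03/4831_전기버스/s3.py | charging
-- ===== SOURCE A (Python) =====
-- def charging(arr, K, N, M):
--     state = result = 0 # state: 현재 칸 // result: 충전한 횟수
--
--     while state < N:
--         if N - state <= K: # 충전 없이 이동할 수 있는 경우
--             break # 충전 안하고 도착하므로 그대로 while문 벗어남
--
--         for i in range(K, 0, -1): # K ~ 1까지(0은 포함하면 안됨)
--             if (state+i) in arr: # state+이동칸의 값이 arr(충전소)에 있는 경우
--                 state += i # 이동
--                 result += 1 # 충천 횟수 +1
--                 break # 더 이상 돌 필요 없음(+갈 곳 없는 경우 else문 실행시켜야 함)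
--         else: # 더 이상 충전하고 못 가는 경우
--             return 0 # 0 반환
--     return result # 결과 반환
-- ===== SOURCE B (Python) =====
-- def charging(arr, K, N, M):
--     stations = sorted(arr)
--     n = len(stations)
--     i = 0  # monotone pointer: stations[:i] are already at or behind the bus
--     state = result = 0
--     while state < N:
--         if N - state <= K:
--             break
--         best = None
--         while i < n and stations[i] <= state + K:
--             if stations[i] > state:
--                 best = stations[i]
--             i += 1
--         if best is None:
--             return 0
--         state = best
--         result += 1
--     return result
-- ===== Notes on version B (the rewrite author's own statement) =====
-- stated objective: alternative
-- what changed: B sorts arr once and sweeps it with a single monotone pointer (each station is examined once across all jumps), replacing A's per-jump countdown over offsets K..1 each doing a membership scan of arr.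
import Mathlib
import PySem

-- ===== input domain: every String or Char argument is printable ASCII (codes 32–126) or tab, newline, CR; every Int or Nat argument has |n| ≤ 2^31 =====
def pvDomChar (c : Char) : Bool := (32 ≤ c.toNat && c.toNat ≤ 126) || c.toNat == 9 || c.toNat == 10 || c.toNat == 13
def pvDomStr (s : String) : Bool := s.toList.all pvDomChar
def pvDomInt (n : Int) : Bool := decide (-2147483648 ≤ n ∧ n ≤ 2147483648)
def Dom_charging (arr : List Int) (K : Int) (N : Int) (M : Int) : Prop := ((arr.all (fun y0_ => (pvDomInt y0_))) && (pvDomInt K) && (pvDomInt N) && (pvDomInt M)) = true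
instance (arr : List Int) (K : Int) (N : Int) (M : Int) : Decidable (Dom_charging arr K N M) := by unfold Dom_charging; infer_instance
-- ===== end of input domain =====

-- B sorts arr once and sweeps the sorted stations with a single monotone pointer (here: the
-- remaining suffix), replacing A's per-jump K..1 offset countdown with its inner membership scans.

-- ===== PORT A =====
-- while-loop of A: state/result are the loop state; the for-else over range(K,0,-1) is find?.
def chargingA_loop (arr : List Int) (K : Int) (N : Int) (state : Int) (result : Int) : Int :=
  if state < N then
    if N - state ≤ K then result
    else
      match h : (PySem.List.pyRange K 0 (-1)).find? (fun i => arr.contains (state + i)) with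
      | some i => chargingA_loop arr K N (state + i) (result + 1)
      | none => 0
  else result
termination_by (N - state).toNat
decreasing_by
  have hmem := List.mem_of_find?_eq_some h
  have := (PySem.List.mem_pyRange_neg_one).1 hmem
  omega

def charging (arr : List Int) (K : Int) (N : Int) (M : Int) : Int :=
  chargingA_loop arr K N 0 0

-- ===== PORT B =====
-- B's inner while-loop: advance the pointer past stations ≤ state+K, remembering the last one
-- > state in `best`; the remaining suffix plays the role of the index i into the sorted list.
def chargingB_scan (state : Int) (K : Int) (best : Option Int) : List Int → Option Int × List Int
  | [] => (best, [])
  | s :: rest =>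
      if s ≤ state + K then
        chargingB_scan state K (if state < s then some s else best) rest
      else (best, s :: rest)

-- needed by chargingB_loop's termination: a found `best` is strictly ahead of `state`
theorem chargingB_scan_gt (state K : Int) : ∀ (rest : List Int) (acc : Option Int) (b : Int)
    (rest' : List Int), (∀ x, acc = some x → state < x) →
    chargingB_scan state K acc rest = (some b, rest') → state < b := by
  intro rest
  induction rest with
  | nil => intro acc b rest' hacc h; simp [chargingB_scan] at h; exact hacc b h.1
  | cons s rest ih =>
    intro acc b rest' hacc h
    simp only [chargingB_scan] at h
    split at h
    · refine ih _ b _ ?_ h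
      intro x hx
      split at hx
      · cases hx; omega
      · exact hacc x hx
    · obtain ⟨h1, _⟩ := Prod.mk.injEq .. ▸ h
      exact hacc b (by simpa using h1)

-- B's outer while-loop, carrying the remaining sorted suffix.
def chargingB_loop (K : Int) (N : Int) (state : Int) (result : Int) (rest : List Int) : Int :=
  if state < N then
    if N - state ≤ K then result
    else
      match h : chargingB_scan state K none rest with
      | (none, _) => 0
      | (some b, rest') => chargingB_loop K N b (result + 1) rest'
  else result
termination_by (N - state).toNat
decreasing_by
  have := chargingB_scan_gt state K rest none b rest' (by intro x hx; cases hx) h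
  omega

def charging_alt (arr : List Int) (K : Int) (N : Int) (M : Int) : Int :=
  chargingB_loop K N 0 0 (PySem.List.sorted arr (fun x => x) false)

-- ===== PRECONDITION & SPEC =====
def Spec_charging (arr : List Int) (K : Int) (N : Int) (M : Int) (out : Int) : Prop := out = charging_alt arr K N M
instance (arr : List Int) (K : Int) (N : Int) (M : Int) (out : Int) : Decidable (Spec_charging arr K N M out) := by unfold Spec_charging; infer_instance

-- ===== CLAIM (what is proved, stated in full; the proofs are below) =====
def Claim_equal_charging : Prop := ∀ (arr : List Int) (K : Int) (N : Int) (M : Int), Dom_charging arr K N M → Spec_charging arr K N M (charging arr K N M)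

-- ===== LEMMAS AND PROOFS =====

-- Characterisation of A's inner for-else: the first hit on range(K,0,-1) is the farthest
-- reachable station; no hit means no station lies in (state, state+K].
theorem find_desc (arr : List Int) (state : Int) : ∀ n : Nat, ∀ K : Int, K.toNat = n →
    match (PySem.List.pyRange K 0 (-1)).find? (fun i => arr.contains (state + i)) with
    | some i => state + i ∈ arr ∧ 0 < i ∧ i ≤ K ∧
        ∀ s ∈ arr, state < s → s ≤ state + K → s ≤ state + i
    | none => ∀ s ∈ arr, ¬(state < s ∧ s ≤ state + K) := by
  intro n
  induction n with
  | zero =>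
    intro K hK
    rw [PySem.List.pyRange_neg_one_eq_nil (by omega)]
    simp only [List.find?_nil]
    intro s _ ⟨h1, h2⟩; omega
  | succ k ih =>
    intro K hK
    rw [PySem.List.pyRange_neg_one_cons (by omega : (0:Int) < K)]
    simp only [List.find?_cons]
    by_cases hc : state + K ∈ arr
    · have hct : arr.contains (state + K) = true := by simpa using hc
      rw [hct]
      exact ⟨hc, by omega, by omega, fun s _ _ h => h⟩
    · have hct : arr.contains (state + K) = false := by simpa using hc
      rw [hct]
      have := ih (K - 1) (by omega)
      revert this
      cases hfound : (PySem.List.pyRange (K-1) 0 (-1)).find? (fun i => arr.contains (state + i)) with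
      | some i =>
        intro ⟨h1, h2, h3, h4⟩
        refine ⟨h1, h2, by omega, fun s hs hlt hle => ?_⟩
        have hne : s ≠ state + K := fun he => hc (he ▸ hs)
        exact h4 s hs hlt (by omega)
      | none =>
        intro hall s hs ⟨h1, h2⟩
        have hne : s ≠ state + K := fun he => hc (he ▸ hs)
        exact hall s hs ⟨h1, by omega⟩

-- Characterisation of B's pointer advance on a sorted suffix: `best` is the maximum station
-- in (state, state+K], and the new suffix keeps every station beyond it.
theorem scan_spec (state K : Int) : ∀ (rest : List Int) (acc : Option Int),
    rest.Pairwise (· ≤ ·) →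
    (∀ x, acc = some x → (state < x ∧ x ≤ state + K) ∧ ∀ t ∈ rest, x ≤ t) →
    match chargingB_scan state K acc rest with
    | (some b, rest') =>
        (state < b ∧ b ≤ state + K) ∧ (acc = some b ∨ b ∈ rest) ∧
        (∀ s ∈ rest, state < s → s ≤ state + K → s ≤ b) ∧
        rest'.Pairwise (· ≤ ·) ∧ (∀ s ∈ rest', s ∈ rest) ∧
        (∀ s ∈ rest, b < s → s ∈ rest')
    | (none, _) => (∀ s ∈ rest, ¬(state < s ∧ s ≤ state + K)) ∧ acc = none := by
  intro rest
  induction rest with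
  | nil =>
    intro acc hs hacc
    cases acc with
    | none =>
      exact ⟨fun s hs => absurd hs (List.not_mem_nil), rfl⟩
    | some x =>
      exact ⟨(hacc x rfl).1, Or.inl rfl, fun s hs => absurd hs (List.not_mem_nil),
        List.Pairwise.nil, fun s hs => hs, fun s hs _ => hs⟩
  | cons s rest ih =>
    intro acc hs hacc
    have hs' : rest.Pairwise (· ≤ ·) := hs.tail
    have hhead : ∀ t ∈ rest, s ≤ t := fun t ht => List.rel_of_pairwise_cons hs ht
    by_cases hle : s ≤ state + K
    · have hstep : chargingB_scan state K acc (s :: rest)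
          = chargingB_scan state K (if state < s then some s else acc) rest := by
        simp [chargingB_scan, hle]
      rw [hstep]
      have hacc' : ∀ x, (if state < s then some s else acc) = some x →
          (state < x ∧ x ≤ state + K) ∧ ∀ t ∈ rest, x ≤ t := by
        intro x hx
        split at hx
        · cases hx; exact ⟨⟨by omega, hle⟩, hhead⟩
        · exact ⟨(hacc x hx).1, fun t ht => (hacc x hx).2 t (List.mem_cons_of_mem s ht)⟩
      have H := ih (if state < s then some s else acc) hs' hacc'
      revert H
      cases hscan : chargingB_scan state K (if state < s then some s else acc) rest with
      | mk bo rs =>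
        cases bo with
        | some b =>
          intro ⟨hwin, hmem, hmax, hp, hsub, hkeep⟩
          have hsb : state < s → s ≤ b := by
            intro hlt
            rcases hmem with hm | hm
            · rw [if_pos hlt] at hm
              exact le_of_eq (Option.some.inj hm)
            · exact hhead b hm
          refine ⟨hwin, ?_, ?_, hp, fun t ht => List.mem_cons_of_mem s (hsub t ht), ?_⟩
          · rcases hmem with hm | hm
            · by_cases hlt : state < s
              · rw [if_pos hlt] at hm; cases hm; exact Or.inr (List.mem_cons_self ..)
              · rw [if_neg hlt] at hm; exact Or.inl hm
            · exact Or.inr (List.mem_cons_of_mem s hm)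
          · intro t ht hlt hle'
            rcases List.mem_cons.1 ht with rfl | ht'
            · exact hsb hlt
            · exact hmax t ht' hlt hle'
          · intro t ht hbt
            rcases List.mem_cons.1 ht with rfl | ht'
            · by_cases hws : state < t
              · have := hsb hws; omega
              · have := hwin.1; omega
            · exact hkeep t ht' hbt
        | none =>
          intro ⟨hnone, haccn⟩
          have hns : ¬ state < s := by
            intro hlt
            rw [if_pos hlt] at haccn
            cases haccn
          rw [if_neg hns] at haccn
          refine ⟨?_, haccn⟩
          intro t ht
          rcases List.mem_cons.1 ht with rfl | ht'
          · intro hw; exact hns hw.1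
          · exact hnone t ht'
    · have hstop : chargingB_scan state K acc (s :: rest) = (acc, s :: rest) := by
        simp [chargingB_scan, hle]
      rw [hstop]
      have hnowin : ∀ t ∈ s :: rest, ¬(state < t ∧ t ≤ state + K) := by
        intro t ht hw
        rcases List.mem_cons.1 ht with rfl | ht'
        · omega
        · have := hhead t ht'; omega
      cases acc with
      | none => exact ⟨hnowin, rfl⟩
      | some x =>
        refine ⟨(hacc x rfl).1, Or.inl rfl, ?_, hs, fun t ht => ht, fun t ht _ => ht⟩
        intro t ht h1 h2; exact absurd ⟨h1, h2⟩ (hnowin t ht)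

theorem loops_eq (arr : List Int) (K N : Int) : ∀ n : Nat, ∀ state result : Int,
    ∀ rest : List Int,
    (N - state).toNat = n →
    rest.Pairwise (· ≤ ·) →
    (∀ s ∈ rest, s ∈ arr) →
    (∀ s ∈ arr, state < s → s ∈ rest) →
    chargingA_loop arr K N state result = chargingB_loop K N state result rest := by
  intro n
  induction n using Nat.strong_induction_on with
  | _ n ih =>
    intro state result rest hn hsorted hsub hall
    rw [chargingA_loop, chargingB_loop]
    by_cases h1 : state < N
    · simp only [if_pos h1]
      by_cases h2 : N - state ≤ K
      · simp [h2]
      · simp only [if_neg h2]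
        have hA := find_desc arr state K.toNat K rfl
        have hB := scan_spec state K rest none hsorted (by intro x hx; cases hx)
        revert hA hB
        cases hfA : (PySem.List.pyRange K 0 (-1)).find? (fun i => arr.contains (state + i)) with
        | none =>
          intro hAnone
          cases hfB : chargingB_scan state K none rest with
          | mk bo rs =>
            cases bo with
            | none => intro _; rfl
            | some b =>
              intro ⟨hwin, hmem, _, _, _, _⟩
              exfalso
              rcases hmem with hm | hm
              · cases hm
              · exact hAnone b (hsub b hm) ⟨hwin.1, hwin.2⟩
        | some i =>
          intro ⟨hmemA, hpos, hleK, hmaxA⟩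
          cases hfB : chargingB_scan state K none rest with
          | mk bo rs =>
            cases bo with
            | none =>
              intro ⟨hnone, _⟩
              exfalso
              have hin : state + i ∈ rest := hall _ hmemA (by omega)
              exact hnone _ hin ⟨by omega, by omega⟩
            | some b =>
              intro ⟨hwin, hmem, hmaxB, hp, hsub', hkeep⟩
              have hbarr : b ∈ arr := by
                rcases hmem with hm | hm
                · cases hm
                · exact hsub b hm
              have h1' : b ≤ state + i := hmaxA b hbarr hwin.1 hwin.2
              have h2' : state + i ≤ b := by
                have hin : state + i ∈ rest := hall _ hmemA (by omega)
                exact hmaxB _ hin (by omega) (by omega)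
              have hbe : state + i = b := by omega
              show chargingA_loop arr K N (state + i) (result + 1) = chargingB_loop K N b (result + 1) rs
              rw [hbe]
              refine ih _ (by omega) b (result + 1) rs rfl hp (fun t ht => hsub t (hsub' t ht)) ?_
              intro t ht hbt
              exact hkeep t (hall t ht (by omega)) hbt
    · simp [h1]

-- ===== VERDICT (by name: the statement is the Claim_ definition above) =====
theorem charging_spec : Claim_equal_charging := by
  intro arr K N M _
  unfold Spec_charging charging charging_alt
  refine loops_eq arr K N _ 0 0 _ rfl ?_ ?_ ?_
  · simpa using PySem.List.sorted_pairwise arr (fun x => x)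
  · intro s hs; exact (PySem.List.mem_sorted _ _ _ _).1 hs
  · intro s hs _; exact (PySem.List.mem_sorted _ _ _ _).2 hs
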